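-- pv_equiv track=rewrite | github.com/Darkneew/Pentago-AI | graphic version/IA.py | fe_naive_defensive
-- ===== SOURCE A (Python) =====
-- def bien_def(i,j, n):
--     if i>=n:
--         return False
--     if i<0:
--         return False
--     if j>=n:
--         return False
--     if j<0:
--         return False
--     return True
--
-- def fe_naive_defensive (g, side):
--     score = 0
--     n = len(g[0])
--     autours = [-1, 0, 1]
--     for i in range(n):
--         for j in range(n):
--             if g[i][j] == 0: continue
--             elif g[i][j] == side:
--                 value = 1
--             else:
--                 value = -10
--             for k in autours:
--                 for l in autours:
--                     if not bien_def(i+k, j+l, n): continue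
--                     if g[i][j] == g[i+k][j+l]: score += value
--     return score
-- ===== SOURCE B (Python) =====
-- def fe_naive_defensive(g, side):
--     n = len(g[0])
--     total = 0
--     for i in range(n):
--         for j in range(n):
--             v = g[i][j]
--             if v == 0:
--                 continue
--             value = 1 if v == side else -10
--             total += value
--             for di, dj in ((0, 1), (1, 0), (1, 1), (1, -1)):
--                 ii, jj = i + di, j + dj
--                 if 0 <= ii < n and 0 <= jj < n and g[ii][jj] == v:
--                     total += 2 * value
--     return total
-- ===== Notes on version B (the rewrite author's own statement) =====
-- stated objective: faster
-- what changed: Instead of scanning all 9 offsets (k,l) in {-1,0,1}^2 per cell through the bien_def bounds-check helper, B adds each nonzero cell's value once (the always-true self-match) and then, for only the 4 forward directions (0,1),(1,0),(1,1),(1,-1), adds 2*value per equal in-bounds neighbour, visiting each unordered adjacent pair once instead of twice.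
import Mathlib
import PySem

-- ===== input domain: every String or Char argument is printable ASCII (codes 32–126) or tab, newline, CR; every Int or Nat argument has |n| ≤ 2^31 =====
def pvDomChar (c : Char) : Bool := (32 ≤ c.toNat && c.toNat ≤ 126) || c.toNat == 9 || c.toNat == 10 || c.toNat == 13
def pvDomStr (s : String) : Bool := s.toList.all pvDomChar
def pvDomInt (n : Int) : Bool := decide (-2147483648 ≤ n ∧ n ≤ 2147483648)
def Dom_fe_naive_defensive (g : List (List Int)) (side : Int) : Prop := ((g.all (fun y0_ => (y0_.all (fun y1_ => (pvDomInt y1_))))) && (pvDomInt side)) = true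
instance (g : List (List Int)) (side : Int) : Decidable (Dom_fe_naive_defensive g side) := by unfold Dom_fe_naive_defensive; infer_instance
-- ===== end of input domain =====

-- B rewrites the 9-direction neighbour scan as: each nonzero cell contributes its value once (the self-match),
-- plus 2×value for each of the 4 forward-direction equal neighbours — each unordered adjacent pair is visited once
-- instead of twice, and the always-true self comparison is dropped (objective: faster by a constant factor).

-- ===== PORT A =====
def bien_def (i j n : Int) : Bool :=
  if i ≥ n then false
  else if i < 0 then false
  else if j ≥ n then false
  else if j < 0 then false
  else true

def fe_naive_defensive (g : List (List Int)) (side : Int) : Int :=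
  let n : Int := PySem.List.len (PySem.List.pyGetD g 0 [])
  (PySem.List.pyRange 0 n 1).foldl (fun score i =>
    (PySem.List.pyRange 0 n 1).foldl (fun score j =>
      if PySem.List.pyGetD (PySem.List.pyGetD g i []) j 0 == 0 then score
      else
        let value : Int := if PySem.List.pyGetD (PySem.List.pyGetD g i []) j 0 == side then 1 else -10
        ([-1, 0, 1] : List Int).foldl (fun score k =>
          ([-1, 0, 1] : List Int).foldl (fun score l =>
            if !bien_def (i + k) (j + l) n then score
            else if PySem.List.pyGetD (PySem.List.pyGetD g i []) j 0 ==
                    PySem.List.pyGetD (PySem.List.pyGetD g (i + k) []) (j + l) 0 then score + value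
            else score) score) score) score) 0

-- ===== PORT B =====
def fe_naive_defensive_alt (g : List (List Int)) (side : Int) : Int :=
  let n : Int := PySem.List.len (PySem.List.pyGetD g 0 [])
  (PySem.List.pyRange 0 n 1).foldl (fun total i =>
    (PySem.List.pyRange 0 n 1).foldl (fun total j =>
      let v : Int := PySem.List.pyGetD (PySem.List.pyGetD g i []) j 0
      if v == 0 then total
      else
        let value : Int := if v == side then 1 else -10
        ([((0:Int),(1:Int)), (1,0), (1,1), (1,-1)] : List (Int × Int)).foldl (fun total d =>
          if (decide (0 ≤ i + d.1) && decide (i + d.1 < n) && decide (0 ≤ j + d.2) && decide (j + d.2 < n))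
              && (PySem.List.pyGetD (PySem.List.pyGetD g (i + d.1) []) (j + d.2) 0 == v)
          then total + 2 * value else total) (total + value)) total) 0

-- ===== PRECONDITION & SPEC =====
-- Pre_ is exactly where the Python returns: g nonempty (g[0] is read), and — with n = len(g[0]) — the first n
-- rows exist and each has at least n cells (otherwise g[i][j] raises IndexError). The ports are total (pyGetD),
-- and the equality proof below happens to hold for all inputs, so the proof does not consume Pre_; Pre_ only
-- delimits where the Lean ports model the Python programs.
def Pre_fe_naive_defensive (g : List (List Int)) (side : Int) : Prop :=
  g ≠ [] ∧ (g.headD []).length ≤ g.length ∧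
    ∀ row ∈ g.take (g.headD []).length, (g.headD []).length ≤ row.length
instance (g : List (List Int)) (side : Int) : Decidable (Pre_fe_naive_defensive g side) := by
  unfold Pre_fe_naive_defensive; infer_instance

def pvWitness_fe_naive_defensive : List (List Int) × Int := ([[1]], 1)

def Spec_fe_naive_defensive (g : List (List Int)) (side : Int) (out : Int) : Prop := out = fe_naive_defensive_alt g side
instance (g : List (List Int)) (side : Int) (out : Int) : Decidable (Spec_fe_naive_defensive g side out) := by unfold Spec_fe_naive_defensive; infer_instance

-- ===== CLAIM (what is proved, stated in full; the proofs are below) =====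
def Claim_equal_fe_naive_defensive : Prop := ∀ (g : List (List Int)) (side : Int), Dom_fe_naive_defensive g side → Pre_fe_naive_defensive g side → Spec_fe_naive_defensive g side (fe_naive_defensive g side)

-- ===== LEMMAS AND PROOFS =====

def Gf (g : List (List Int)) (i j : Int) : Int := PySem.List.pyGetD (PySem.List.pyGetD g i []) j 0

theorem Gf_def (g : List (List Int)) (i j : Int) :
    PySem.List.pyGetD (PySem.List.pyGetD g i []) j 0 = Gf g i j := rfl

def tt (g : List (List Int)) (side n : Int) (d p : Int × Int) : Int :=
  if Gf g p.1 p.2 ≠ 0 ∧ (0 ≤ p.1 + d.1 ∧ p.1 + d.1 < n ∧ 0 ≤ p.2 + d.2 ∧ p.2 + d.2 < n) ∧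
      Gf g p.1 p.2 = Gf g (p.1 + d.1) (p.2 + d.2)
  then (if Gf g p.1 p.2 = side then 1 else -10) else 0

def SS (n : ℕ) : Finset (ℤ × ℤ) := (Finset.range n ×ˢ Finset.range n).image (fun p => ((p.1 : ℤ), (p.2 : ℤ)))
def nineD : List (Int × Int) :=
  [(-1,-1),(-1,0),(-1,1),(0,-1),(0,0),(0,1),(1,-1),(1,0),(1,1)]

theorem mem_SS (n : ℕ) (p : ℤ × ℤ) :
    p ∈ SS n ↔ 0 ≤ p.1 ∧ p.1 < (n : ℤ) ∧ 0 ≤ p.2 ∧ p.2 < (n : ℤ) := by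
  unfold SS
  simp only [Finset.mem_image, Finset.mem_product, Finset.mem_range, Prod.ext_iff]
  constructor
  · rintro ⟨⟨a,b⟩, ⟨ha, hb⟩, h1, h2⟩; simp only at ha hb h1 h2; omega
  · rintro ⟨h1, h2, h3, h4⟩
    exact ⟨(p.1.toNat, p.2.toNat), ⟨by omega, by omega⟩, by simp; omega, by simp; omega⟩

theorem bien_def_iff (i j n : Int) :
    bien_def i j n = true ↔ (0 ≤ i ∧ i < n ∧ 0 ≤ j ∧ j < n) := by
  unfold bien_def; split_ifs <;> simp <;> omega

theorem tt_pair (g : List (List Int)) (side n i j k l : Int) :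
    tt g side n (k, l) (i, j) =
      (if Gf g i j ≠ 0 ∧ (0 ≤ i + k ∧ i + k < n ∧ 0 ≤ j + l ∧ j + l < n) ∧
          Gf g i j = Gf g (i + k) (j + l)
       then (if Gf g i j = side then 1 else -10) else 0) := rfl

theorem cellstepA (g : List (List Int)) (side n i j : Int) (h0 : Gf g i j ≠ 0) (k l s : Int) :
    (if !bien_def (i + k) (j + l) n then s
     else if Gf g i j == Gf g (i + k) (j + l) then
       s + (if Gf g i j == side then (1:Int) else -10)
     else s) = s + tt g side n (k, l) (i, j) := by
  rw [tt_pair]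
  by_cases hb : (0 ≤ i + k ∧ i + k < n ∧ 0 ≤ j + l ∧ j + l < n)
  · have hbt : bien_def (i + k) (j + l) n = true := (bien_def_iff _ _ _).mpr hb
    by_cases he : Gf g i j = Gf g (i + k) (j + l)
    · simp [hbt, he, hb, he ▸ h0]
    · simp [hbt, he]
  · have hbt : bien_def (i + k) (j + l) n = false := by
      rcases Bool.eq_false_or_eq_true (bien_def (i + k) (j + l) n) with h | h
      · exact absurd ((bien_def_iff _ _ _).mp h) hb
      · exact h
    simp [hbt, hb]

theorem cellstepB (g : List (List Int)) (side n i j : Int) (h0 : Gf g i j ≠ 0) (k l s : Int) :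
    (if (decide (0 ≤ i + k) && decide (i + k < n) && decide (0 ≤ j + l) && decide (j + l < n))
          && (Gf g (i + k) (j + l) == Gf g i j)
     then s + 2 * (if Gf g i j == side then (1:Int) else -10) else s)
    = s + 2 * tt g side n (k, l) (i, j) := by
  rw [tt_pair]
  by_cases hb : (0 ≤ i + k ∧ i + k < n ∧ 0 ≤ j + l ∧ j + l < n)
  · by_cases he : Gf g i j = Gf g (i + k) (j + l)
    · simp [hb.1, hb.2.1, hb.2.2.1, hb.2.2.2, he, he ▸ h0]
    · simp [hb.1, hb.2.1, hb.2.2.1, hb.2.2.2, Ne.symm he, he]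
  · have h2 : ¬(Gf g i j ≠ 0 ∧ (0 ≤ i + k ∧ i + k < n ∧ 0 ≤ j + l ∧ j + l < n) ∧
        Gf g i j = Gf g (i + k) (j + l)) := by tauto
    rw [if_neg h2, if_neg (by simp only [Bool.and_eq_true, decide_eq_true_iff]; tauto)]
    ring

theorem A_jbody (g : List (List Int)) (side n i j s : Int) :
    (if Gf g i j == 0 then s
     else
       ([-1, 0, 1] : List Int).foldl (fun score k =>
         ([-1, 0, 1] : List Int).foldl (fun score l =>
           if !bien_def (i + k) (j + l) n then score
           else if Gf g i j == Gf g (i + k) (j + l) then score + (if Gf g i j == side then (1:Int) else -10)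
           else score) score) s)
    = s + (nineD.map (fun d => tt g side n d (i, j))).sum := by
  by_cases h0 : Gf g i j = 0
  · simp [h0, nineD, tt]
  · rw [if_neg (by simp [h0])]
    simp only [List.foldl_cons, List.foldl_nil]
    simp only [cellstepA g side n i j h0]
    simp only [nineD, List.map_cons, List.map_nil, List.sum_cons, List.sum_nil]
    ring

theorem B_jbody (g : List (List Int)) (side n i j s : Int)
    (hi : 0 ≤ i ∧ i < n) (hj : 0 ≤ j ∧ j < n) :
    (if Gf g i j == 0 then s
     else
       ([((0:Int),(1:Int)), (1,0), (1,1), (1,-1)] : List (Int × Int)).foldl (fun total d =>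
         if (decide (0 ≤ i + d.1) && decide (i + d.1 < n) && decide (0 ≤ j + d.2) && decide (j + d.2 < n))
             && (Gf g (i + d.1) (j + d.2) == Gf g i j)
         then total + 2 * (if Gf g i j == side then (1:Int) else -10) else total)
         (s + (if Gf g i j == side then (1:Int) else -10)))
    = s + (tt g side n (0,0) (i,j) +
        (2 * tt g side n (0,1) (i,j) + (2 * tt g side n (1,0) (i,j) +
         (2 * tt g side n (1,1) (i,j) + 2 * tt g side n (1,-1) (i,j))))) := by
  by_cases h0 : Gf g i j = 0
  · simp [h0, tt]
  · have hself : tt g side n (0,0) (i,j) = (if Gf g i j == side then (1:Int) else -10) := by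
      rw [tt_pair]
      simp [h0, hi.1, hi.2, hj.1, hj.2]
    rw [if_neg (by simp [h0])]
    simp only [List.foldl_cons, List.foldl_nil]
    simp only [cellstepB g side n i j h0]
    rw [hself]
    ring


def jterm (g : List (List Int)) (side n i j : Int) : Int :=
  (nineD.map (fun d => tt g side n d (i, j))).sum

def bterm (g : List (List Int)) (side n i j : Int) : Int :=
  tt g side n (0,0) (i,j) +
    (2 * tt g side n (0,1) (i,j) + (2 * tt g side n (1,0) (i,j) +
     (2 * tt g side n (1,1) (i,j) + 2 * tt g side n (1,-1) (i,j))))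

theorem list_sum_range (n : ℕ) (f : ℕ → ℤ) :
    ((List.range n).map f).sum = ∑ i ∈ Finset.range n, f i := rfl

theorem sum_SS (N : ℕ) (F : ℤ → ℤ → ℤ) :
    ∑ p ∈ SS N, F p.1 p.2 = ∑ a ∈ Finset.range N, ∑ b ∈ Finset.range N, F (a : ℤ) (b : ℤ) := by
  unfold SS
  rw [Finset.sum_image (by intro a _ b _ h; simpa [Prod.ext_iff] using h)]
  rw [← Finset.sum_product']

theorem A_eq (g : List (List Int)) (side : Int) :
    fe_naive_defensive g side =
      ∑ p ∈ SS (PySem.List.pyGetD g 0 []).length,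
        jterm g side ((PySem.List.pyGetD g 0 []).length : ℤ) p.1 p.2 := by
  unfold fe_naive_defensive
  simp only [PySem.List.len_eq, Gf_def]
  generalize (PySem.List.pyGetD g 0 []).length = N
  have hJ : ∀ (i s : ℤ),
      List.foldl (fun score j =>
        if (Gf g i j == 0) = true then score
        else
          List.foldl (fun score k =>
            List.foldl (fun score l =>
              if (!bien_def (i + k) (j + l) (N : ℤ)) = true then score
              else
                if (Gf g i j == Gf g (i + k) (j + l)) = true then
                  score + if (Gf g i j == side) = true then 1 else -10
                else score) score [-1, 0, 1]) score [-1, 0, 1]) s (PySem.List.pyRange 0 (N : ℤ))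
      = s + ((PySem.List.pyRange 0 (N : ℤ)).map (fun j => jterm g side (N : ℤ) i j)).sum := by
    intro i s
    rw [PySem.List.foldl_congr_mem _ _ (fun score j => score + jterm g side (N : ℤ) i j) s
          (fun acc x _ => A_jbody g side (N : ℤ) i x acc)]
    exact PySem.List.foldl_add _ _ _
  refine Eq.trans (PySem.List.foldl_congr_mem _ _
      (fun score i => score + ((PySem.List.pyRange 0 (N : ℤ)).map (fun j => jterm g side (N : ℤ) i j)).sum) 0
      ?_) ?_
  · intro acc x _
    exact hJ x acc
  rw [PySem.List.foldl_add, zero_add]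
  simp only [PySem.List.pyRange_zero_natCast, List.map_map]
  rw [sum_SS]
  simp only [list_sum_range, Function.comp_apply]

theorem B_eq (g : List (List Int)) (side : Int) :
    fe_naive_defensive_alt g side =
      ∑ p ∈ SS (PySem.List.pyGetD g 0 []).length,
        bterm g side ((PySem.List.pyGetD g 0 []).length : ℤ) p.1 p.2 := by
  unfold fe_naive_defensive_alt
  simp only [Gf_def]
  have hJ : ∀ (i s : ℤ), 0 ≤ i → i < PySem.List.len (PySem.List.pyGetD g 0 []) →
      List.foldl (fun total j =>
        if (Gf g i j == 0) = true then total
        else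
          List.foldl (fun total d =>
            if (decide (0 ≤ i + d.1) && decide (i + d.1 < PySem.List.len (PySem.List.pyGetD g 0 [])) &&
                  decide (0 ≤ j + d.2) && decide (j + d.2 < PySem.List.len (PySem.List.pyGetD g 0 [])) &&
                  (Gf g (i + d.1) (j + d.2) == Gf g i j)) = true
            then total + 2 * if (Gf g i j == side) = true then 1 else -10
            else total)
            (total + if (Gf g i j == side) = true then 1 else -10)
            [(0, 1), (1, 0), (1, 1), (1, -1)]) s
          (PySem.List.pyRange 0 (PySem.List.len (PySem.List.pyGetD g 0 [])))
      = s + ((PySem.List.pyRange 0 (PySem.List.len (PySem.List.pyGetD g 0 []))).map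
          (fun j => bterm g side (PySem.List.len (PySem.List.pyGetD g 0 [])) i j)).sum := by
    intro i s hi0 hiN
    refine Eq.trans (PySem.List.foldl_congr_mem _ _
        (fun total j => total + bterm g side (PySem.List.len (PySem.List.pyGetD g 0 [])) i j) s ?_) ?_
    · intro acc x hx
      rw [PySem.List.mem_pyRange_one] at hx
      exact B_jbody g side (PySem.List.len (PySem.List.pyGetD g 0 [])) i x acc ⟨hi0, hiN⟩ ⟨hx.1, hx.2⟩
    exact PySem.List.foldl_add _ _ _
  refine Eq.trans (PySem.List.foldl_congr_mem _ _
      (fun total i => total + ((PySem.List.pyRange 0 (PySem.List.len (PySem.List.pyGetD g 0 []))).map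
        (fun j => bterm g side (PySem.List.len (PySem.List.pyGetD g 0 [])) i j)).sum) 0
      ?_) ?_
  · intro acc x hx
    rw [PySem.List.mem_pyRange_one] at hx
    exact hJ x acc hx.1 hx.2
  rw [PySem.List.foldl_add, zero_add]
  simp only [PySem.List.len_eq, PySem.List.pyRange_zero_natCast, List.map_map]
  rw [sum_SS]
  simp only [list_sum_range, Function.comp_apply]

theorem tt_shift_cell (g : List (List Int)) (side n : Int) (d1 d2 : Int) (p : ℤ × ℤ)
    (hp : 0 ≤ p.1 ∧ p.1 < n ∧ 0 ≤ p.2 ∧ p.2 < n)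
    (hq : 0 ≤ p.1 - d1 ∧ p.1 - d1 < n ∧ 0 ≤ p.2 - d2 ∧ p.2 - d2 < n) :
    tt g side n (-d1, -d2) p = tt g side n (d1, d2) (p.1 - d1, p.2 - d2) := by
  have e1 : p.1 + -d1 = p.1 - d1 := by ring
  have e2 : p.2 + -d2 = p.2 - d2 := by ring
  have e3 : p.1 - d1 + d1 = p.1 := by ring
  have e4 : p.2 - d2 + d2 = p.2 := by ring
  have h5 : d1 ≤ p.1 := by omega
  have h6 : d2 ≤ p.2 := by omega
  by_cases he : Gf g p.1 p.2 = Gf g (p.1 - d1) (p.2 - d2)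
  · simp only [tt, e1, e2, e3, e4]
    by_cases h0 : Gf g (p.1 - d1) (p.2 - d2) = 0 <;>
      simp [hp.1, hp.2.1, hp.2.2.1, hp.2.2.2, hq.1, hq.2.1, hq.2.2.1, hq.2.2.2, he, h0, h5, h6]
  · simp only [tt, e1, e2, e3, e4]
    simp [he, Ne.symm he]

theorem sum_shift (g : List (List Int)) (side : Int) (N : ℕ) (d1 d2 : Int) :
    ∑ p ∈ SS N, tt g side (N : ℤ) (-d1, -d2) p = ∑ p ∈ SS N, tt g side (N : ℤ) (d1, d2) p := by
  classical
  have hL : ∀ p ∈ SS N, tt g side (N : ℤ) (-d1, -d2) p ≠ 0 →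
      (0 ≤ p.1 - d1 ∧ p.1 - d1 < (N : ℤ) ∧ 0 ≤ p.2 - d2 ∧ p.2 - d2 < (N : ℤ)) := by
    intro p _ hnz
    by_contra hc
    apply hnz
    simp only [tt]
    rw [if_neg]
    rintro ⟨-, hb, -⟩
    omega
  have hR : ∀ p ∈ SS N, tt g side (N : ℤ) (d1, d2) p ≠ 0 →
      (0 ≤ p.1 + d1 ∧ p.1 + d1 < (N : ℤ) ∧ 0 ≤ p.2 + d2 ∧ p.2 + d2 < (N : ℤ)) := by
    intro p _ hnz
    by_contra hc
    apply hnz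
    simp only [tt]
    rw [if_neg]
    rintro ⟨-, hb, -⟩
    omega
  rw [← Finset.sum_filter_of_ne hL, ← Finset.sum_filter_of_ne hR]
  refine Finset.sum_nbij' (fun p => (p.1 - d1, p.2 - d2)) (fun p => (p.1 + d1, p.2 + d2))
    ?_ ?_ ?_ ?_ ?_
  · intro a ha
    simp only [Finset.mem_filter, mem_SS] at ha ⊢
    constructor
    · omega
    · constructor <;> omega
  · intro a ha
    simp only [Finset.mem_filter, mem_SS] at ha ⊢
    constructor
    · omega
    · constructor <;> omega
  · intro a _
    simp
  · intro a _
    simp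
  · intro a ha
    simp only [Finset.mem_filter, mem_SS] at ha
    exact tt_shift_cell g side (N : ℤ) d1 d2 a ⟨ha.1.1, ha.1.2.1, ha.1.2.2.1, ha.1.2.2.2⟩ ha.2

-- ===== VERDICT (by name: the statement is the Claim_ definition above) =====
theorem fe_naive_defensive_spec : Claim_equal_fe_naive_defensive := by
  intro g side _ _
  unfold Spec_fe_naive_defensive
  rw [A_eq, B_eq]
  have s1 : ∑ p ∈ SS (PySem.List.pyGetD g 0 []).length,
        tt g side ((PySem.List.pyGetD g 0 []).length : ℤ) (0, -1) p
      = ∑ p ∈ SS (PySem.List.pyGetD g 0 []).length,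
        tt g side ((PySem.List.pyGetD g 0 []).length : ℤ) (0, 1) p := by
    simpa using sum_shift g side (PySem.List.pyGetD g 0 []).length 0 1
  have s2 : ∑ p ∈ SS (PySem.List.pyGetD g 0 []).length,
        tt g side ((PySem.List.pyGetD g 0 []).length : ℤ) (-1, 0) p
      = ∑ p ∈ SS (PySem.List.pyGetD g 0 []).length,
        tt g side ((PySem.List.pyGetD g 0 []).length : ℤ) (1, 0) p := by
    simpa using sum_shift g side (PySem.List.pyGetD g 0 []).length 1 0
  have s3 : ∑ p ∈ SS (PySem.List.pyGetD g 0 []).length,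
        tt g side ((PySem.List.pyGetD g 0 []).length : ℤ) (-1, -1) p
      = ∑ p ∈ SS (PySem.List.pyGetD g 0 []).length,
        tt g side ((PySem.List.pyGetD g 0 []).length : ℤ) (1, 1) p := by
    simpa using sum_shift g side (PySem.List.pyGetD g 0 []).length 1 1
  have s4 : ∑ p ∈ SS (PySem.List.pyGetD g 0 []).length,
        tt g side ((PySem.List.pyGetD g 0 []).length : ℤ) (-1, 1) p
      = ∑ p ∈ SS (PySem.List.pyGetD g 0 []).length,
        tt g side ((PySem.List.pyGetD g 0 []).length : ℤ) (1, -1) p := by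
    simpa using sum_shift g side (PySem.List.pyGetD g 0 []).length 1 (-1)
  simp only [jterm, bterm, nineD, List.map_cons, List.map_nil, List.sum_cons, List.sum_nil]
  simp only [Finset.sum_add_distrib, add_zero]
  simp only [← Finset.mul_sum]
  rw [s1, s2, s3, s4]
  ring
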